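-- pv_equiv track=rewrite | github.com/omg-xodnd/algorithm | BOJ/simulation/20061.py | check_top
-- ===== SOURCE A (Python) =====
-- def check_top(board):
--     count = 0
--     for r in range(2):
--         for block in board[r]:
--             if block:
--                 count += 1
--                 break
--
--     for _ in range(count):
--         board.pop()
--         board.insert(0, [0, 0, 0, 0])
--
--     return board
-- ===== SOURCE B (Python) =====
-- def check_top(board):
--     count = sum(1 for row in board[:2] if any(row))
--     board[:] = [[0, 0, 0, 0] for _ in range(count)] + board[:len(board) - count]
--     return board
-- ===== Notes on version B (the rewrite author's own statement) =====
-- stated objective: simpler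
-- what changed: Replaces the break-loop counter and the repeated pop/insert shifting loop with a filtered count of the first two rows and a single slice reconstruction of the board.
import Mathlib
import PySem

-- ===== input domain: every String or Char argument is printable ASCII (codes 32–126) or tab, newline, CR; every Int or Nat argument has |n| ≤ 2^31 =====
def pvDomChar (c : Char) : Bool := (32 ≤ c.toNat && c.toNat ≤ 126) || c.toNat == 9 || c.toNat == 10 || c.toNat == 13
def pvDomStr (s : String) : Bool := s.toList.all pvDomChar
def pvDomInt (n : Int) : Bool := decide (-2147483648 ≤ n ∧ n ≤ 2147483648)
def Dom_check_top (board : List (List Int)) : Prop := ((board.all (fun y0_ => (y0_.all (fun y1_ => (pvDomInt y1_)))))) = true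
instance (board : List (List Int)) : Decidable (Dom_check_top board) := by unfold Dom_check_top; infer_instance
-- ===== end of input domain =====

-- B replaces A's break-loop counter and pop/insert shifting loop by a filtered count and one
-- slice reconstruction (simpler). Both Pythons mutate `board` in place in the same way; the
-- equivalence proved here is about the RETURN value.

-- ===== PORT A =====
-- inner `for block in board[r]: if block: count += 1; break`
def pvRowLoop : List Int → Bool
  | [] => false
  | b :: rest => if b ≠ 0 then true else pvRowLoop rest

-- `for _ in range(count): board.pop(); board.insert(0, [0,0,0,0])`
-- (board.pop() on an empty board would raise; excluded by Pre_, dropLast is exact elsewhere)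
def pvPopInsertLoop : Nat → List (List Int) → List (List Int)
  | 0, bs => bs
  | n + 1, bs => pvPopInsertLoop n ([0, 0, 0, 0] :: bs.dropLast)

def check_top (board : List (List Int)) : List (List Int) :=
  let count := (List.range 2).foldl
    (fun c (r : Nat) =>
      match PySem.List.pyGet? board (r : Int) with
      | none => c            -- board[r] raises IndexError here; excluded by Pre_
      | some row => if pvRowLoop row then c + 1 else c) 0
  pvPopInsertLoop count board

-- ===== PORT B =====
def check_top_alt (board : List (List Int)) : List (List Int) :=
  let count := ((PySem.List.slice board none (some 2)).filter (fun row => row.any (fun b => b ≠ 0))).length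
  List.replicate count [0, 0, 0, 0] ++ List.take (board.length - count) board

-- ===== PRECONDITION & SPEC =====
-- Pre_ excludes exactly the boards with fewer than 2 rows, on which A raises IndexError at board[r].
def Pre_check_top (board : List (List Int)) : Prop := 2 ≤ board.length
instance (board : List (List Int)) : Decidable (Pre_check_top board) := by unfold Pre_check_top; infer_instance
def pvWitness_check_top : List (List Int) := [[1, 0, 0, 0], [0, 0, 0, 0], [1, 1, 1, 1]]

def Spec_check_top (board : List (List Int)) (out : List (List Int)) : Prop := out = check_top_alt board
instance (board : List (List Int)) (out : List (List Int)) : Decidable (Spec_check_top board out) := by unfold Spec_check_top; infer_instance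

-- ===== CLAIM (what is proved, stated in full; the proofs are below) =====
def Claim_equal_check_top : Prop := ∀ (board : List (List Int)), Dom_check_top board → Pre_check_top board → Spec_check_top board (check_top board)
-- ===== LEMMAS AND PROOFS =====

lemma pvRowLoop_eq_any (row : List Int) : pvRowLoop row = row.any (fun b => b ≠ 0) := by
  induction row with
  | nil => rfl
  | cons b rest ih => by_cases hb : b = 0 <;> simp [pvRowLoop, ih, hb]

lemma pvPopInsertLoop_eq (n : Nat) : ∀ (bs : List (List Int)), n ≤ bs.length →
    pvPopInsertLoop n bs = List.replicate n [0, 0, 0, 0] ++ List.take (bs.length - n) bs := by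
  induction n with
  | zero => intro bs _; simp [pvPopInsertLoop]
  | succ n ih =>
    intro bs hn
    have hlen : ([0, 0, 0, 0] :: bs.dropLast).length = bs.length := by
      simp [List.length_dropLast]; omega
    have h1 : n ≤ ([0, 0, 0, 0] :: bs.dropLast).length := by omega
    rw [pvPopInsertLoop, ih _ h1, hlen]
    have hsub : bs.length - n = (bs.length - (n + 1)) + 1 := by omega
    rw [hsub, List.take_succ_cons, List.dropLast_eq_take, List.take_take]
    have hmin : min (bs.length - (n + 1)) (bs.length - 1) = bs.length - (n + 1) := by omega
    rw [hmin]
    have hrep : List.replicate n ([0, 0, 0, 0] : List Int) ++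
        ([0, 0, 0, 0] : List Int) :: List.take (bs.length - (n + 1)) bs =
        List.replicate (n + 1) ([0, 0, 0, 0] : List Int) ++ List.take (bs.length - (n + 1)) bs := by
      rw [List.replicate_succ']; simp
    rw [hrep, List.replicate_succ]

-- ===== VERDICT (by name: the statement is the Claim_ definition above) =====
theorem check_top_spec : Claim_equal_check_top := by
  intro board _ hpre
  unfold Pre_check_top at hpre
  match board with
  | [] => simp at hpre
  | [_] => simp at hpre
  | a :: b :: t =>
    simp only [Spec_check_top, check_top, check_top_alt]
    have hslice : PySem.List.slice (a :: b :: t) none (some 2) = [a, b] := by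
      have := PySem.List.slice_to_natCast (a :: b :: t) 2
      simpa using this
    have hr : List.range 2 = [0, 1] := rfl
    rw [hslice, hr]
    simp only [List.foldl_cons, List.foldl_nil, PySem.List.pyGet?_natCast,
      List.getElem?_cons_zero, List.getElem?_cons_succ, pvRowLoop_eq_any]
    by_cases ha : (a.any (fun x => decide (x ≠ 0))) = true <;>
      by_cases hb : (b.any (fun x => decide (x ≠ 0))) = true <;>
      · simp only [List.filter_cons, List.filter_nil, ha, hb, if_true, if_false,
          Bool.false_eq_true, List.length_cons, List.length_nil]
        rw [pvPopInsertLoop_eq] <;> simp
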